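-- pv_equiv track=rewrite | github.com/mhaneman/CSC323_PROJ_1 | src/task_C.py | has_res
-- ===== SOURCE A (Python) =====
-- def has_res(text: str) -> bool:
--     byte_dict = {}
--     for t in text:
--         if t in byte_dict:
--             byte_dict[t] += 1
--         else:
--             byte_dict[t] = 1
--
--     for key, val in byte_dict.items():
--         if val >= 20:
--             return True
--     return False
-- ===== SOURCE B (Python) =====
-- def has_res(text: str) -> bool:
--     # sort the characters, then a single run-length scan over the sorted list
--     run = 0
--     prev = None
--     for c in sorted(text):
--         run = run + 1 if c == prev else 1
--         if run >= 20:
--             return True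
--         prev = c
--     return False
-- ===== Notes on version B (the rewrite author's own statement) =====
-- stated objective: alternative
-- what changed: Replaces the hash-map frequency count with sorting the characters followed by a single run-length scan that returns True as soon as a run of 20 equal characters is seen.
import Mathlib
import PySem

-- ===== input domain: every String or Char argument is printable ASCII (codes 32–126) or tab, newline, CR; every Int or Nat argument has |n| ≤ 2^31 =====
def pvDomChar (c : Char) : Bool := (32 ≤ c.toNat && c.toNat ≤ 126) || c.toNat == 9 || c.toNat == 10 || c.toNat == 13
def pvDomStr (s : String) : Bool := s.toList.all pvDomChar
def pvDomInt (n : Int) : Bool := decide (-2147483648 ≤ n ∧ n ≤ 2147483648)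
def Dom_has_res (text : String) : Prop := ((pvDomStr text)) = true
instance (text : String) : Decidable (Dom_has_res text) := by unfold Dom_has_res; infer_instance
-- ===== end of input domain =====

-- B replaces A's hash-map frequency count by sorting the characters and doing one
-- run-length scan (alternative decomposition, similar cost).

-- ===== PORT A =====
-- the counting loop body: if t in byte_dict: byte_dict[t] += 1 else: byte_dict[t] = 1
def hasResStep (d : PySem.Dict Char Int) (t : Char) : PySem.Dict Char Int :=
  if d.contains t then d.modify t 0 (· + 1) else d.insert t 1

def has_res (text : String) : Bool :=
  -- byte_dict built by the loop; then: for key, val in byte_dict.items(): if val >= 20: return True / return False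
  (text.toList.foldl hasResStep PySem.Dict.empty).items.any (fun kv => decide (20 ≤ kv.2))

-- ===== PORT B =====
-- the run-length scan with early return True; prev starts as None
def hasResRun : Int → Option Char → List Char → Bool
  | _, _, [] => false
  | run, prev, c :: cs =>
      let r : Int := if some c = prev then run + 1 else 1
      if 20 ≤ r then true else hasResRun r (some c) cs

def has_res_alt (text : String) : Bool :=
  hasResRun 0 none (PySem.List.sorted text.toList (fun c => c) false)

-- ===== PRECONDITION & SPEC =====
def Spec_has_res (text : String) (out : Bool) : Prop := out = has_res_alt text
instance (text : String) (out : Bool) : Decidable (Spec_has_res text out) := by unfold Spec_has_res; infer_instance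

-- ===== CLAIM (what is proved, stated in full; the proofs are below) =====
def Claim_equal_has_res : Prop := ∀ (text : String), Dom_has_res text → Spec_has_res text (has_res text)

-- ===== LEMMAS AND PROOFS =====

-- A's counting step is exactly the Counter step
lemma hasResStep_eq_modify (d : PySem.Dict Char Int) (t : Char) :
    hasResStep d t = d.modify t 0 (· + 1) := by
  unfold hasResStep
  split_ifs with h
  · rfl
  · have h' : d.contains t = false := by simpa using h
    simp [PySem.Dict.modify, PySem.Dict.getD_of_not_contains, h']

-- A returns true iff some character occurs at least 20 times
lemma has_res_iff (text : String) :
    has_res text = true ↔ ∃ c ∈ text.toList, 20 ≤ (text.toList.count c : Int) := by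
  unfold has_res
  have hstep : hasResStep = (fun d t => d.modify t 0 (· + 1)) :=
    funext fun d => funext fun t => hasResStep_eq_modify d t
  rw [hstep, ← PySem.Dict.counter_eq_foldl, PySem.Dict.items_counter,
    List.any_map, List.any_eq_true]
  constructor
  · rintro ⟨c, hc, h⟩
    exact ⟨c, (PySem.Set.mem_ofList _ _).1 hc, by simpa using h⟩
  · rintro ⟨c, hc, h⟩
    exact ⟨c, (PySem.Set.mem_ofList _ _).2 hc, by simpa using h⟩

-- the run scan on a sorted tail, with a live previous character
lemma hasResRun_some (ys : List Char) : ∀ (p : Char) (run : Int),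
    ys.Pairwise (· ≤ ·) → (∀ c ∈ ys, p ≤ c) → run < 20 →
    (hasResRun run (some p) ys = true ↔
      20 ≤ run + (ys.count p : Int) ∨ ∃ c ∈ ys, c ≠ p ∧ 20 ≤ (ys.count c : Int)) := by
  induction ys with
  | nil => intro p run _ _ hrun; simp [hasResRun]; omega
  | cons c cs ih =>
    intro p run hpw hle hrun
    have hpw' : cs.Pairwise (· ≤ ·) := hpw.of_cons
    have hcle : ∀ x ∈ cs, c ≤ x := fun x hx => List.rel_of_pairwise_cons hpw hx
    simp only [hasResRun, Option.some.injEq]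
    split_ifs with hceq h20 h20
    · -- c = p and the run just reached 20
      subst hceq
      simp only [true_iff]
      left
      have : (c :: cs).count c = cs.count c + 1 := List.count_cons_self
      rw [this]; push_cast; omega
    · -- c = p, continue the run
      subst hceq
      rw [ih c (run + 1) hpw' hcle (by omega)]
      have hcnt : (c :: cs).count c = cs.count c + 1 := List.count_cons_self
      constructor
      · rintro (h | ⟨x, hx, hxc, h⟩)
        · left; rw [hcnt]; push_cast; omega
        · exact Or.inr ⟨x, List.mem_cons_of_mem _ hx, hxc,
            by rwa [List.count_cons_of_ne (Ne.symm hxc)]⟩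
      · rintro (h | ⟨x, hx, hxc, h⟩)
        · left; rw [hcnt] at h; push_cast at h ⊢; omega
        · rcases List.mem_cons.1 hx with rfl | hx'
          · exact absurd rfl hxc
          · exact Or.inr ⟨x, hx', hxc, by rwa [List.count_cons_of_ne (Ne.symm hxc)] at h⟩
    · -- c ≠ p and 20 ≤ 1: impossible
      exact absurd h20 (by norm_num)
    · -- new character: start a run of length 1
      have hpc : p < c := lt_of_le_of_ne (hle c List.mem_cons_self) (fun h => hceq h.symm)
      rw [ih c 1 hpw' hcle (by norm_num)]
      have hp0 : (c :: cs).count p = 0 := by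
        rw [List.count_eq_zero]
        intro hp
        rcases List.mem_cons.1 hp with rfl | hp'
        · exact hceq rfl
        · exact absurd (hcle p hp') (not_le.2 hpc)
      have hcc : (c :: cs).count c = cs.count c + 1 := List.count_cons_self
      constructor
      · rintro (h | ⟨x, hx, hxc, h⟩)
        · refine Or.inr ⟨c, List.mem_cons_self, hceq, ?_⟩
          rw [hcc]; push_cast; omega
        · have hxp : x ≠ p := fun hxp => absurd (hcle x hx) (not_le.2 (hxp ▸ hpc))
          exact Or.inr ⟨x, List.mem_cons_of_mem _ hx, hxp,
            by rwa [List.count_cons_of_ne (Ne.symm hxc)]⟩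
      · rintro (h | ⟨x, hx, hxp, h⟩)
        · rw [hp0] at h; push_cast at h; omega
        · rcases List.mem_cons.1 hx with rfl | hx'
          · left; rw [hcc] at h; push_cast at h ⊢; omega
          · by_cases hxc : x = c
            · subst hxc
              left; rw [List.count_cons_self] at h; push_cast at h ⊢; omega
            · exact Or.inr ⟨x, hx', hxc, by rwa [List.count_cons_of_ne (Ne.symm hxc)] at h⟩

-- the run scan from the initial None state
lemma hasResRun_none (ys : List Char) (hpw : ys.Pairwise (· ≤ ·)) :
    hasResRun 0 none ys = true ↔ ∃ c ∈ ys, 20 ≤ (ys.count c : Int) := by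
  cases ys with
  | nil => simp [hasResRun]
  | cons c cs =>
    have hpw' : cs.Pairwise (· ≤ ·) := hpw.of_cons
    have hcle : ∀ x ∈ cs, c ≤ x := fun x hx => List.rel_of_pairwise_cons hpw hx
    simp only [hasResRun, reduceCtorEq, if_false]
    rw [if_neg (by norm_num), hasResRun_some cs c 1 hpw' hcle (by norm_num)]
    have hcc : (c :: cs).count c = cs.count c + 1 := List.count_cons_self
    constructor
    · rintro (h | ⟨x, hx, hxc, hcnt⟩)
      · exact ⟨c, List.mem_cons_self, by rw [hcc]; push_cast; omega⟩
      · exact ⟨x, List.mem_cons_of_mem _ hx, by rwa [List.count_cons_of_ne (Ne.symm hxc)]⟩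
    · rintro ⟨x, hx, hcnt⟩
      by_cases hxc : x = c
      · subst hxc
        left; rw [hcc] at hcnt; push_cast at hcnt ⊢; omega
      · rcases List.mem_cons.1 hx with rfl | hx'
        · exact absurd rfl hxc
        · exact Or.inr ⟨x, hx', hxc, by rwa [List.count_cons_of_ne (Ne.symm hxc)] at hcnt⟩

lemma has_res_alt_iff (text : String) :
    has_res_alt text = true ↔ ∃ c ∈ text.toList, 20 ≤ (text.toList.count c : Int) := by
  unfold has_res_alt
  have hperm : (PySem.List.sorted text.toList (fun c => c) false).Perm text.toList :=
    PySem.List.sorted_perm _ _ _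
  rw [hasResRun_none _ (by simpa using PySem.List.sorted_pairwise text.toList (fun c => c))]
  constructor
  · rintro ⟨c, hc, h⟩
    exact ⟨c, hperm.mem_iff.1 hc, by rwa [hperm.count_eq] at h⟩
  · rintro ⟨c, hc, h⟩
    exact ⟨c, hperm.mem_iff.2 hc, by rwa [hperm.count_eq]⟩

-- ===== VERDICT (by name: the statement is the Claim_ definition above) =====
theorem has_res_spec : Claim_equal_has_res := by
  intro text _
  unfold Spec_has_res
  rw [Bool.eq_iff_iff, has_res_iff, has_res_alt_iff]
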